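-- pv_equiv track=rewrite | github.com/libo-cv/paper | A Novel Adaptive Feature Fusion strategy for Image Retrieval/relation_function.py | ac_img_label
-- ===== SOURCE A (Python) =====
-- def ac_img_label(origion_file):
--     """
--     返回数据集每类样本所占的区间
--     :param origion_file:标签文件
--     :return:第i类样本在第m个到第n个位置
--     """
--     origion_line = len(origion_file)
--     name_map = {}
--     for j in range(origion_line):
--         image_name = origion_file[j]
--         class_name = image_name.split('/')[0]
--         if class_name in name_map.keys():
--             name_map[class_name][1] += 1
--         else:
--             name_map[class_name] = [j, j]
--     return name_map
-- ===== SOURCE B (Python) =====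
-- def ac_img_label(origion_file):
--     # Two passes: bucket each sample index by its class, then emit
--     # [first_index, first_index + count - 1] per class (first-appearance order).
--     buckets = {}
--     for j, image_name in enumerate(origion_file):
--         buckets.setdefault(image_name.split('/')[0], []).append(j)
--     return {c: [idxs[0], idxs[0] + len(idxs) - 1] for c, idxs in buckets.items()}
-- ===== Notes on version B (the rewrite author's own statement) =====
-- stated objective: alternative
-- what changed: Replaces the single conditional update loop (create-or-increment-end on the dict value) by a bucket-then-map decomposition: one pass grouping indices per class, then a dict comprehension computing [first, first+count-1].
import Mathlib
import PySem

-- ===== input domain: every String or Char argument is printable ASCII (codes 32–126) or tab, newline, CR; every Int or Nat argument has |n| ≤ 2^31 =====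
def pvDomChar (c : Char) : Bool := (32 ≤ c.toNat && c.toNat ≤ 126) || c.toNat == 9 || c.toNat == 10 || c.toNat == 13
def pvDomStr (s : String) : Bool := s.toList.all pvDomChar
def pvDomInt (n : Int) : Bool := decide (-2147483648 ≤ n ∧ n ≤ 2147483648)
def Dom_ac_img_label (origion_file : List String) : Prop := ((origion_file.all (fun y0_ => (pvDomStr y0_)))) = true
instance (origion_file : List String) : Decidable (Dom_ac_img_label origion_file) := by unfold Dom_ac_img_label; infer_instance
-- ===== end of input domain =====

-- B replaces A's create-or-increment dict loop by a bucket-then-map decomposition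
-- (group indices per class, then emit [first, first+count-1]); same result, same O(n) shape.


-- ===== PORT A =====
-- image_name.split('/')[0]: split with non-empty sep never raises and never returns [],
-- so the two defaults below are never taken.
def pvClassName (image_name : String) : String :=
  ((PySem.Str.split? image_name "/").getD []).headD ""

def ac_img_label (origion_file : List String) : List (String × List Int) :=
  let origion_line := PySem.List.len origion_file
  let name_map :=
    (PySem.List.pyRange 0 origion_line 1).foldl (fun name_map j =>
      -- j ∈ range(len(origion_file)), so indexing never raises
      let image_name := PySem.List.pyGetD origion_file j ""
      let class_name := pvClassName image_name
      if name_map.contains class_name then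
        -- name_map[class_name][1] += 1 : in-place update of element 1 of the stored pair
        let v := name_map.getD class_name []
        name_map.insert class_name (v.set 1 (PySem.List.pyGetD v 1 0 + 1))
      else
        name_map.insert class_name [j, j]) PySem.Dict.empty
  name_map.items

-- ===== PORT B =====
def ac_img_label_alt (origion_file : List String) : List (String × List Int) :=
  let buckets :=
    (PySem.List.enumerate origion_file 0).foldl
      (fun d p => d.modify (pvClassName p.2) [] (fun L => L ++ [p.1]))
      PySem.Dict.empty
  buckets.items.map (fun p => (p.1, [p.2.headD 0, p.2.headD 0 + (p.2.length : Int) - 1]))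

-- ===== PRECONDITION & SPEC =====
def Spec_ac_img_label (origion_file : List String) (out : List (String × List Int)) : Prop := out = ac_img_label_alt origion_file
instance (origion_file : List String) (out : List (String × List Int)) : Decidable (Spec_ac_img_label origion_file out) := by unfold Spec_ac_img_label; infer_instance

-- ===== CLAIM (what is proved, stated in full; the proofs are below) =====
def Claim_equal_ac_img_label : Prop := ∀ (origion_file : List String), Dom_ac_img_label origion_file → Spec_ac_img_label origion_file (ac_img_label origion_file)

-- ===== LEMMAS AND PROOFS =====

-- A's loop step, seen over (index, element) pairs
def pvStepA (m : PySem.Dict String (List Int)) (j : Int) (image_name : String) :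
    PySem.Dict String (List Int) :=
  if m.contains (pvClassName image_name) then
    m.insert (pvClassName image_name)
      ((m.getD (pvClassName image_name) []).set 1
        (PySem.List.pyGetD (m.getD (pvClassName image_name) []) 1 0 + 1))
  else
    m.insert (pvClassName image_name) [j, j]

-- the view turning a bucket entry into A's [start, start+count-1] entry
def pvRng (p : String × List Int) : String × List Int :=
  (p.1, [p.2.headD 0, p.2.headD 0 + (p.2.length : Int) - 1])

def pvInv (m b : PySem.Dict String (List Int)) : Prop :=
  m.items = b.items.map pvRng ∧ b.keys.Nodup ∧ ∀ p ∈ b.items, p.2 ≠ []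

-- A's index loop is the enumerate loop
lemma pv_fold_range_enum {σ : Type} (g : σ → Int → String → σ) :
    ∀ (suf pre : List String) (init : σ),
      (PySem.List.pyRange (pre.length : Int) ((pre.length : Int) + (suf.length : Int)) 1).foldl
        (fun acc j => g acc j (PySem.List.pyGetD (pre ++ suf) j "")) init
      = (PySem.List.enumerate suf (pre.length : Int)).foldl (fun acc p => g acc p.1 p.2) init := by
  intro suf
  induction suf with
  | nil =>
    intro pre init
    rw [PySem.List.pyRange_one_eq_nil (by simp)]
    simp [PySem.List.enumerate_nil]
  | cons x suf ih =>
    intro pre init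
    have hlt : (pre.length : Int) < (pre.length : Int) + ((x :: suf).length : Int) := by
      push_cast [List.length_cons]; omega
    rw [PySem.List.pyRange_one_cons hlt, PySem.List.enumerate_cons]
    simp only [List.foldl_cons]
    have hx : PySem.List.pyGetD (pre ++ x :: suf) (pre.length : Int) "" = x := by
      rw [PySem.List.pyGetD_natCast]
      simp [List.getD_eq_getElem?_getD]
    rw [hx]
    have e2 : (pre.length : Int) + 1 = ((pre ++ [x]).length : Int) := by
      simp [List.length_append]
    have e3 : (pre.length : Int) + ((x :: suf).length : Int)
        = ((pre ++ [x]).length : Int) + (suf.length : Int) := by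
      simp [List.length_append, List.length_cons]; ring
    have e1 : pre ++ x :: suf = (pre ++ [x]) ++ suf := by simp
    rw [e2, e3, e1]
    exact ih (pre ++ [x]) (g init (pre.length : Int) x)

lemma pv_contains_eq (m b : PySem.Dict String (List Int))
    (h : m.items = b.items.map pvRng) (c : String) : m.contains c = b.contains c := by
  simp only [PySem.Dict.contains, h, List.any_map]
  rfl

lemma pv_step (m b : PySem.Dict String (List Int)) (j : Int) (x : String)
    (h : pvInv m b) :
    pvInv (pvStepA m j x) (b.modify (pvClassName x) [] (fun L => L ++ [j])) := by
  obtain ⟨hit, hnd, hne⟩ := h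
  have hmnd : m.keys.Nodup := by
    have : m.keys = b.keys := by
      simp [PySem.Dict.keys, hit, List.map_map, pvRng, Function.comp]
    rw [this]; exact hnd
  have hc : m.contains (pvClassName x) = b.contains (pvClassName x) :=
    pv_contains_eq m b hit (pvClassName x)
  have hmod : b.modify (pvClassName x) [] (fun L => L ++ [j])
      = b.insert (pvClassName x) (b.getD (pvClassName x) [] ++ [j]) := rfl
  unfold pvStepA
  by_cases hbc : b.contains (pvClassName x) = true
  · -- key already present
    obtain ⟨L, hL⟩ : ∃ L, b.get? (pvClassName x) = some L := by
      have := PySem.Dict.contains_eq_isSome_get? (d := b) (k := pvClassName x)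
      rw [hbc] at this
      exact Option.isSome_iff_exists.mp this.symm
    have hmem : (pvClassName x, L) ∈ b.items := PySem.Dict.mem_items_of_get?_eq_some b hL
    have hLne : L ≠ [] := hne _ hmem
    have hgD : b.getD (pvClassName x) [] = L := PySem.Dict.getD_of_get?_eq_some b [] hL
    have hmmem : (pvClassName x, [L.headD 0, L.headD 0 + (L.length : Int) - 1]) ∈ m.items := by
      rw [hit]; exact List.mem_map_of_mem hmem
    have hmget : m.getD (pvClassName x) [] = [L.headD 0, L.headD 0 + (L.length : Int) - 1] :=
      PySem.Dict.getD_of_mem_items m hmmem hmnd []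
    have hnewv : (m.getD (pvClassName x) []).set 1
        (PySem.List.pyGetD (m.getD (pvClassName x) []) 1 0 + 1)
        = [L.headD 0, L.headD 0 + (L.length : Int)] := by
      rw [hmget]
      simp [PySem.List.pyGetD, PySem.List.pyGet?, PySem.List.pyIdx?]
    rw [if_pos (by rw [hc]; exact hbc), hmod, hnewv]
    refine ⟨?_, ?_, ?_⟩
    · rw [PySem.Dict.items_insert_of_contains _ _ (by rw [hc]; exact hbc),
        PySem.Dict.items_insert_of_contains _ _ hbc, hit, List.map_map, List.map_map]
      refine List.map_congr_left ?_
      intro p hp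
      by_cases hpc : p.1 = pvClassName x
      · have hpL : p.2 = L := by
          have h1 : b.getD p.1 [] = p.2 := by
            have : (p.1, p.2) ∈ b.items := hp
            exact PySem.Dict.getD_of_mem_items b this hnd []
          rw [hpc, hgD] at h1; exact h1.symm
        obtain ⟨y, t, hyt⟩ : ∃ y t, L = y :: t := by
          cases L with
          | nil => exact absurd rfl hLne
          | cons y t => exact ⟨y, t, rfl⟩
        simp [Function.comp, pvRng, hpc, hpL, hyt, hgD, List.length_append]
        omega
      · simp [Function.comp, pvRng, hpc]
    · rw [PySem.Dict.keys_insert_of_contains _ _ hbc]; exact hnd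
    · intro p hp
      rcases (PySem.Dict.mem_items_insert _ _ _ _).mp hp with hpe | ⟨hpb, _⟩
      · rw [hpe]; simp
      · exact hne _ hpb
  · -- fresh key
    have hmc : ¬ m.contains (pvClassName x) = true := by rw [hc]; exact hbc
    have hgD : b.getD (pvClassName x) [] = [] :=
      PySem.Dict.getD_of_not_contains _ _ (by simpa using hbc)
    rw [if_neg hmc, hmod, hgD]
    refine ⟨?_, ?_, ?_⟩
    · rw [PySem.Dict.items_insert_of_not_contains _ _ (by simpa using hmc),
        PySem.Dict.items_insert_of_not_contains _ _ (by simpa using hbc), hit, List.map_append]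
      simp [pvRng]
    · rw [PySem.Dict.keys_insert_of_not_contains _ _ (by simpa using hbc)]
      refine List.Nodup.append hnd (List.nodup_singleton _) ?_
      intro a ha hb2
      simp at hb2
      subst hb2
      exact hbc (by simpa [PySem.Dict.contains_iff_mem_keys] using ha)
    · intro p hp
      rcases (PySem.Dict.mem_items_insert _ _ _ _).mp hp with hpe | ⟨hpb, _⟩
      · rw [hpe]; simp
      · exact hne _ hpb

lemma pv_fold_inv (l : List (Int × String)) :
    ∀ m b, pvInv m b →
      pvInv (l.foldl (fun m p => pvStepA m p.1 p.2) m)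
            (l.foldl (fun d p => d.modify (pvClassName p.2) [] (fun L => L ++ [p.1])) b) := by
  intro m b h
  induction l generalizing m b with
  | nil => exact h
  | cons p l ih => exact ih _ _ (pv_step _ _ _ _ h)

-- ===== VERDICT (by name: the statement is the Claim_ definition above) =====
theorem ac_img_label_spec : Claim_equal_ac_img_label := by
  intro xs _
  show _ = _
  have hb := pv_fold_range_enum pvStepA xs [] PySem.Dict.empty
  simp only [List.length_nil, Int.natCast_zero, List.nil_append, zero_add] at hb
  have hinv := pv_fold_inv (PySem.List.enumerate xs 0) PySem.Dict.empty PySem.Dict.empty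
    ⟨rfl, List.nodup_nil, by intro p hp; simp [PySem.Dict.empty] at hp⟩
  unfold ac_img_label ac_img_label_alt
  simp only [PySem.List.len_eq]
  show (List.foldl (fun acc j => pvStepA acc j (PySem.List.pyGetD xs j ""))
      PySem.Dict.empty (PySem.List.pyRange 0 (xs.length : Int) 1)).items
    = List.map pvRng
        (List.foldl (fun d p => d.modify (pvClassName p.2) [] (fun L => L ++ [p.1]))
          PySem.Dict.empty (PySem.List.enumerate xs 0)).items
  rw [hb]
  exact hinv.1
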